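-- pv_equiv track=rewrite | github.com/prathamgupta36/CTF-Writeups | 2026/tkbctf5_2026/crypto/random-in-the-future/solve.py | state_from_assignment
-- ===== SOURCE A (Python) =====
-- TEMPER_B = 0x9D2C5680
--
-- TEMPER_C = 0xEFC60000
--
-- def untemper_exact(y):
--     def ur(value, shift):
--         out = 0
--         for i in range(31, -1, -1):
--             bit = ((value >> i) & 1) ^ (((out >> (i + shift)) & 1) if i + shift < 32 else 0)
--             out |= bit << i
--         return out
--
--     def ul(value, shift, mask):
--         out = 0
--         for i in range(32):
--             bit = ((value >> i) & 1) ^ ((((out >> (i - shift)) & 1) if i - shift >= 0 else 0) & ((mask >> i) & 1))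
--             out |= bit << i
--         return out
--
--     y = ur(y, 18)
--     y = ul(y, 15, TEMPER_C)
--     y = ul(y, 7, TEMPER_B)
--     y = ur(y, 11)
--     return y
--
-- def state_from_assignment(first_chunks, inv_var, assignment):
--     index_of = {coord: idx for idx, coord in enumerate(inv_var)}
--     state = []
--     for pos, (value, known_bits) in enumerate(first_chunks):
--         if known_bits == 32:
--             full = value
--         else:
--             unknown_low = 32 - known_bits
--             full = value << unknown_low
--             for bit in range(unknown_low):
--                 if (assignment >> index_of[(pos, bit)]) & 1:
--                     full |= 1 << bit
--         state.append(untemper_exact(full))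
--     return state
-- ===== SOURCE B (Python) =====
-- TEMPER_B = 0x9D2C5680
--
-- TEMPER_C = 0xEFC60000
--
-- _M32 = 0xFFFFFFFF
--
--
-- def _inv_right(v, shift, passes):
--     # invert y ^= y >> shift on a 32-bit word: x = v ^ (v>>s) ^ (v>>2s) ^ ...
--     x = v
--     for _ in range(passes):
--         x = v ^ (x >> shift)
--     return x
--
--
-- def _inv_left(v, shift, mask, passes):
--     # invert y ^= (y << shift) & mask on a 32-bit word (mask < 2**32 keeps x 32-bit)
--     x = v
--     for _ in range(passes):
--         x = v ^ ((x << shift) & mask)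
--     return x
--
--
-- def _untemper(y):
--     y &= _M32
--     y = _inv_right(y, 18, 1)
--     y = _inv_left(y, 15, TEMPER_C, 2)
--     y = _inv_left(y, 7, TEMPER_B, 4)
--     y = _inv_right(y, 11, 2)
--     return y
--
--
-- def state_from_assignment(first_chunks, inv_var, assignment):
--     index_of = {coord: idx for idx, coord in enumerate(inv_var)}
--
--     def full_word(pos, value, known_bits):
--         if known_bits == 32:
--             return value
--         unknown_low = 32 - known_bits
--         word = value << unknown_low
--         for bit in range(unknown_low):
--             if (assignment >> index_of[(pos, bit)]) & 1:
--                 word |= 1 << bit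
--         return word
--
--     return [_untemper(full_word(pos, value, known_bits))
--             for pos, (value, known_bits) in enumerate(first_chunks)]
-- ===== Notes on version B (the rewrite author's own statement) =====
-- stated objective: faster
-- what changed: The temper inversion is rewritten as a handful of whole-word XOR-shift-mask passes (1/2 passes for the right shifts 18/11, 2/4 masked passes for the left shifts 15/7) instead of the two 32-iteration bit-by-bit reconstruction loops per ur/ul step, and the state list is built by a comprehension over a word-assembly helper.
import Mathlib
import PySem

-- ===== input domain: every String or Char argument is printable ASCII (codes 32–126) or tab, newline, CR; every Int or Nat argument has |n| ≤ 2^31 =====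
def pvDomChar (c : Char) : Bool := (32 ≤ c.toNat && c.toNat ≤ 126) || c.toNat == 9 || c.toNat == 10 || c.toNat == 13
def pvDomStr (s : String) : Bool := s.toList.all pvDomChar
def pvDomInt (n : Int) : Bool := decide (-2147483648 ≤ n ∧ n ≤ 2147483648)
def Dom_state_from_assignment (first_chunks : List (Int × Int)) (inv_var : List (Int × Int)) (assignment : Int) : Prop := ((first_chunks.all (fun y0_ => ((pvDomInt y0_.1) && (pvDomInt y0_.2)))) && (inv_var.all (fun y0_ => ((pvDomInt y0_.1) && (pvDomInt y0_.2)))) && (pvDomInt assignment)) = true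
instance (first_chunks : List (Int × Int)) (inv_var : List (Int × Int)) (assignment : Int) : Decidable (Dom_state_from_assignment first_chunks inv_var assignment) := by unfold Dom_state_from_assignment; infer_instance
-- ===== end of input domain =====

-- B replaces untemper_exact's two 32-iteration bit-by-bit inversion loops (ur/ul) by a handful of
-- word-level XOR-shift-mask passes per stage (objective: fewer operations per chunk, same exact values).

-- ===== PORT A (and B) =====
-- ===== PORT A =====
-- A-side helpers: literal transliteration of untemper_exact's bit-by-bit ur/ul loops.

-- index_of = {coord: idx for idx, coord in enumerate(inv_var)}  (identical line in Source A and Source B)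
def pvIndexOf (inv_var : List (Int × Int)) : PySem.Dict (Int × Int) Int :=
  (PySem.List.enumerate inv_var).foldl (fun d p => d.insert p.2 p.1) PySem.Dict.empty

-- ur(value, shift): for i in range(31,-1,-1): bit = ((value>>i)&1) ^ (((out>>(i+shift))&1) if i+shift<32 else 0); out |= bit<<i
def pvUrA (value : Int) (shift : Int) : Int :=
  (PySem.List.pyRange 31 (-1) (-1)).foldl
    (fun out i =>
      PySem.Int.bor out
        ((PySem.Int.bxor (PySem.Int.band (value >>> i.toNat) 1)
          (if i + shift < 32 then PySem.Int.band (out >>> (i + shift).toNat) 1 else 0)) <<< i.toNat))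
    0

-- ul(value, shift, mask): for i in range(32): bit = ((value>>i)&1) ^ ((((out>>(i-shift))&1) if i-shift>=0 else 0) & ((mask>>i)&1)); out |= bit<<i
def pvUlA (value : Int) (shift : Int) (mask : Int) : Int :=
  (PySem.List.pyRange 0 32 1).foldl
    (fun out i =>
      PySem.Int.bor out
        ((PySem.Int.bxor (PySem.Int.band (value >>> i.toNat) 1)
          (PySem.Int.band (if 0 ≤ i - shift then PySem.Int.band (out >>> (i - shift).toNat) 1 else 0)
            (PySem.Int.band (mask >>> i.toNat) 1))) <<< i.toNat))
    0

-- untemper_exact: y = ur(y,18); y = ul(y,15,TEMPER_C); y = ul(y,7,TEMPER_B); y = ur(y,11)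
def pvUntemperA (y : Int) : Int :=
  pvUrA (pvUlA (pvUlA (pvUrA y 18) 15 0xEFC60000) 7 0x9D2C5680) 11

-- loop body assembling `full` for one enumerated chunk p = (pos, (value, known_bits));
-- index_of[(pos, bit)] is getD (present under Pre_; KeyError excluded); value << (32-known_bits)
-- uses .toNat (negative shift = ValueError, excluded by Pre_)
def pvFullA (index_of : PySem.Dict (Int × Int) Int) (assignment : Int) (p : Int × (Int × Int)) : Int :=
  if p.2.2 == 32 then p.2.1
  else
    (PySem.List.pyRange 0 (32 - p.2.2) 1).foldl
      (fun full bit =>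
        if PySem.Int.band (assignment >>> ((index_of.getD (p.1, bit) 0).toNat)) 1 ≠ 0
        then PySem.Int.bor full (1 <<< bit.toNat) else full)
      (p.2.1 <<< (32 - p.2.2).toNat)

def state_from_assignment (first_chunks : List (Int × Int)) (inv_var : List (Int × Int)) (assignment : Int) : List Int :=
  let index_of := pvIndexOf inv_var
  (PySem.List.enumerate first_chunks).foldl
    (fun state p => state ++ [pvUntemperA (pvFullA index_of assignment p)]) []

-- ===== PORT B =====
-- B-side helpers: word-level inversion passes from Source B.

-- _inv_right(v, shift, passes): x = v; repeat passes times: x = v ^ (x >> shift)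
def pvInvRight (v : Int) (shift : Int) (passes : Int) : Int :=
  (PySem.List.pyRange 0 passes 1).foldl
    (fun x _ => PySem.Int.bxor v (x >>> shift.toNat)) v

-- _inv_left(v, shift, mask, passes): x = v; repeat passes times: x = v ^ ((x << shift) & mask)
def pvInvLeft (v : Int) (shift : Int) (mask : Int) (passes : Int) : Int :=
  (PySem.List.pyRange 0 passes 1).foldl
    (fun x _ => PySem.Int.bxor v (PySem.Int.band (x <<< shift.toNat) mask)) v

-- _untemper(y)
def pvUntemperB (y : Int) : Int :=
  let y0 := PySem.Int.band y 0xFFFFFFFF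
  let y1 := pvInvRight y0 18 1
  let y2 := pvInvLeft y1 15 0xEFC60000 2
  let y3 := pvInvLeft y2 7 0x9D2C5680 4
  pvInvRight y3 11 2

-- full_word(pos, value, known_bits) of Source B (same assembly as A's loop body, as a helper)
def pvFullB (index_of : PySem.Dict (Int × Int) Int) (assignment : Int) (pos value known_bits : Int) : Int :=
  if known_bits == 32 then value
  else
    (PySem.List.pyRange 0 (32 - known_bits) 1).foldl
      (fun full bit =>
        if PySem.Int.band (assignment >>> ((index_of.getD (pos, bit) 0).toNat)) 1 ≠ 0
        then PySem.Int.bor full (1 <<< bit.toNat) else full)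
      (value <<< (32 - known_bits).toNat)

def state_from_assignment_alt (first_chunks : List (Int × Int)) (inv_var : List (Int × Int)) (assignment : Int) : List Int :=
  let index_of := pvIndexOf inv_var
  (PySem.List.enumerate first_chunks).map
    (fun p => pvUntemperB (pvFullB index_of assignment p.1 p.2.1 p.2.2))

-- ===== PRECONDITION & SPEC =====
-- Pre_ excludes exactly the inputs where Python A raises: known_bits > 32 on a chunk
-- (value << negative is a ValueError) and a needed coordinate (pos, bit) missing from
-- inv_var (KeyError in index_of). A returns normally on everything else.
def Pre_state_from_assignment (first_chunks : List (Int × Int)) (inv_var : List (Int × Int)) (assignment : Int) : Prop :=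
  ∀ p ∈ PySem.List.enumerate first_chunks, p.2.2 ≠ 32 →
    p.2.2 ≤ 32 ∧ (32 - p.2.2).natAbs ≤ inv_var.length ∧
      ∀ b : Nat, b < (32 - p.2.2).natAbs → (p.1, (b : Int)) ∈ inv_var
instance (first_chunks : List (Int × Int)) (inv_var : List (Int × Int)) (assignment : Int) : Decidable (Pre_state_from_assignment first_chunks inv_var assignment) := by unfold Pre_state_from_assignment; infer_instance

def pvWitness_state_from_assignment : (List (Int × Int)) × (List (Int × Int)) × Int :=
  ([(5, 31)], [(0, 0)], 1)

-- ===== SPEC =====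
def Spec_state_from_assignment (first_chunks : List (Int × Int)) (inv_var : List (Int × Int)) (assignment : Int) (out : List Int) : Prop := out = state_from_assignment_alt first_chunks inv_var assignment
instance (first_chunks : List (Int × Int)) (inv_var : List (Int × Int)) (assignment : Int) (out : List Int) : Decidable (Spec_state_from_assignment first_chunks inv_var assignment out) := by unfold Spec_state_from_assignment; infer_instance

-- ===== CLAIM (what is proved, stated in full; the proofs are below) =====
def Claim_equal_state_from_assignment : Prop := ∀ (first_chunks : List (Int × Int)) (inv_var : List (Int × Int)) (assignment : Int), Dom_state_from_assignment first_chunks inv_var assignment → Pre_state_from_assignment first_chunks inv_var assignment → Spec_state_from_assignment first_chunks inv_var assignment (state_from_assignment first_chunks inv_var assignment)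


-- ===== LEMMAS AND PROOFS =====

-- Nat mirrors of the four stages (low 32 bits; the Int ports are cast-bridged onto these).
def pvDecList : Nat → List Nat
  | 0 => []
  | j+1 => j :: pvDecList j

def pvStepR (n s : Nat) (out i : Nat) : Nat :=
  out ||| ((((n >>> i) &&& 1) ^^^ (if i + s < 32 then (out >>> (i+s)) &&& 1 else 0)) <<< i)

def pvUrN (n s : Nat) : Nat := (pvDecList 32).foldl (pvStepR n s) 0

def pvStepL (n s m : Nat) (out i : Nat) : Nat :=
  out ||| ((((n >>> i) &&& 1) ^^^
    ((if s ≤ i then (out >>> (i-s)) &&& 1 else 0) &&& ((m >>> i) &&& 1))) <<< i)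

def pvUlN (n s m : Nat) : Nat := (List.range 32).foldl (pvStepL n s m) 0

def pvIRN (v s : Nat) : Nat → Nat
  | 0 => v
  | t+1 => v ^^^ (pvIRN v s t >>> s)

def pvILN (v s m : Nat) : Nat → Nat
  | 0 => v
  | t+1 => v ^^^ ((pvILN v s m t <<< s) &&& m)

-- the exact-inverse bit recurrences (gR: right shift by s'+1; gL: masked left shift by s'+1)
def pvGR (n s' : Nat) (i : Nat) : Bool :=
  if i < 32 then
    (n.testBit i) ^^ (if _h : i + (s'+1) < 32 then pvGR n s' (i + (s'+1)) else false)
  else false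
termination_by 32 - i
decreasing_by omega

def pvGL (n m s' : Nat) (i : Nat) : Bool :=
  (n.testBit i) ^^ (if _h : s'+1 ≤ i then (m.testBit i && pvGL n m s' (i - (s'+1))) else false)
termination_by i
decreasing_by omega

-- small bit facts
lemma pvAndOne (x j : Nat) : (x >>> j) &&& 1 = (x.testBit j).toNat := by
  simp only [Nat.and_one_is_mod, Nat.testBit_eq_decide_div_mod_eq, Nat.shiftRight_eq_div_pow]
  rcases Nat.mod_two_eq_zero_or_one (x / 2^j) with h | h <;> simp [h]

lemma pvTbOne (i : Nat) : Nat.testBit 1 i = decide (i = 0) := by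
  cases i with
  | zero => decide
  | succ k => simp [Nat.testBit_succ]

lemma pvTbToNat (b : Bool) (i : Nat) : (b.toNat).testBit i = (b && decide (i = 0)) := by
  cases b <;> simp [pvTbOne]

lemma pvXorToNat (a b : Bool) : a.toNat ^^^ b.toNat = (a ^^ b).toNat := by
  cases a <;> cases b <;> rfl

lemma pvHighBit {x : Nat} (hx : x < 2^32) {i : Nat} (hi : 32 ≤ i) : x.testBit i = false :=
  Nat.testBit_lt_two_pow (lt_of_lt_of_le hx (Nat.pow_le_pow_right (by norm_num) hi))

lemma pvLtOfBits (x : Nat) (h : ∀ i, 32 ≤ i → x.testBit i = false) : x < 2^32 :=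
  Nat.lt_pow_two_of_testBit x h

-- gR / gL vanish above bit 31
lemma pvGR_high (n s' i : Nat) (h : 32 ≤ i) : pvGR n s' i = false := by
  rw [pvGR]; simp [Nat.not_lt.mpr h]

lemma pvGL_high (n m s' : Nat) (hn : n < 2^32) (hm : m < 2^32) :
    ∀ i, 32 ≤ i → pvGL n m s' i = false := by
  intro i h
  rw [pvGL]
  simp [pvHighBit hn h, pvHighBit hm h]

-- testBit of one pvStepR application
lemma pvStepR_testBit (n s' : Nat) (out j : Nat) (hj : j < 32)
    (hout : ∀ i, out.testBit i = (decide (j + 1 ≤ i) && pvGR n s' i)) :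
    ∀ i, (pvStepR n (s'+1) out j).testBit i = (decide (j ≤ i) && pvGR n s' i) := by
  intro i
  have hbit : ((n >>> j) &&& 1) ^^^ (if j + (s'+1) < 32 then (out >>> (j+(s'+1))) &&& 1 else 0)
      = (pvGR n s' j).toNat := by
    rw [pvAndOne]
    by_cases hc : j + (s'+1) < 32
    · rw [if_pos hc, pvAndOne, hout, pvXorToNat]
      have : (decide (j + 1 ≤ j + (s'+1)) && pvGR n s' (j + (s'+1))) = pvGR n s' (j + (s'+1)) := by
        simp
      rw [this]
      conv_rhs => rw [pvGR]
      rw [if_pos hj, dif_pos hc]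
    · rw [if_neg hc]
      have : ((n.testBit j).toNat : Nat) ^^^ 0 = ((n.testBit j) ^^ false).toNat := by
        simp
      rw [this]
      conv_rhs => rw [pvGR]
      rw [if_pos hj, dif_neg hc]
  rw [pvStepR, hbit, Nat.testBit_or, hout, Nat.testBit_shiftLeft, pvTbToNat]
  by_cases h1 : i = j
  · subst h1; simp
  · by_cases h2 : j + 1 ≤ i
    · simp [h2, show j ≤ i by omega, show ¬ (i - j = 0) by omega]
    · simp [h2, show ¬ j ≤ i by omega]

-- folding pvStepR down pvDecList j preserves the invariant
lemma pvUrAux (n s' : Nat) : ∀ j, j ≤ 32 → ∀ out : Nat,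
    (∀ i, out.testBit i = (decide (j ≤ i) && pvGR n s' i)) →
    ∀ i, ((pvDecList j).foldl (pvStepR n (s'+1)) out).testBit i = pvGR n s' i := by
  intro j
  induction j with
  | zero =>
    intro _ out hout i
    have := hout i
    simpa using this
  | succ j ih =>
    intro hj out hout i
    have hstep := pvStepR_testBit n s' out j (by omega) (by intro i; simpa using hout i)
    exact ih (by omega) _ (by intro i; simpa using hstep i) i

lemma pvUrN_testBit (n s' : Nat) : ∀ i, (pvUrN n (s'+1)).testBit i = pvGR n s' i := by
  have h0 : ∀ i, (0 : Nat).testBit i = (decide (32 ≤ i) && pvGR n s' i) := by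
    intro i
    by_cases h : 32 ≤ i
    · simp [pvGR_high n s' i h]
    · simp [h]
  exact pvUrAux n s' 32 le_rfl 0 h0

lemma pvUrN_lt (n s' : Nat) : pvUrN n (s'+1) < 2^32 :=
  pvLtOfBits _ (fun i hi => by rw [pvUrN_testBit, pvGR_high n s' i hi])

-- testBit of one pvStepL application
lemma pvStepL_testBit (n m s' : Nat) (out j : Nat)
    (hout : ∀ i, out.testBit i = (decide (i < j) && pvGL n m s' i)) :
    ∀ i, (pvStepL n (s'+1) m out j).testBit i = (decide (i < j + 1) && pvGL n m s' i) := by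
  intro i
  have hbit : ((n >>> j) &&& 1) ^^^
      ((if s'+1 ≤ j then (out >>> (j-(s'+1))) &&& 1 else 0) &&& ((m >>> j) &&& 1))
      = (pvGL n m s' j).toNat := by
    rw [pvAndOne n j, pvAndOne m j]
    by_cases hc : s'+1 ≤ j
    · rw [if_pos hc, pvAndOne, hout]
      have hlt : (decide (j - (s'+1) < j) && pvGL n m s' (j-(s'+1))) = pvGL n m s' (j-(s'+1)) := by
        simp [show j - (s'+1) < j by omega]
      rw [hlt]
      have : (pvGL n m s' (j-(s'+1))).toNat &&& (m.testBit j).toNat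
          = ((m.testBit j) && pvGL n m s' (j-(s'+1))).toNat := by
        cases (pvGL n m s' (j-(s'+1))) <;> cases (m.testBit j) <;> rfl
      rw [this, pvXorToNat]
      conv_rhs => rw [pvGL]
      rw [dif_pos hc]
    · rw [if_neg hc]
      have : (0 : Nat) &&& (m.testBit j).toNat = (false : Bool).toNat := by
        cases (m.testBit j) <;> rfl
      rw [this, pvXorToNat]
      conv_rhs => rw [pvGL]
      rw [dif_neg hc]
  rw [pvStepL, hbit, Nat.testBit_or, hout, Nat.testBit_shiftLeft, pvTbToNat]
  by_cases h1 : i = j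
  · subst h1; simp
  · by_cases h2 : i < j
    · simp [h2, show i < j + 1 by omega, show ¬ (j ≤ i) by omega]
    · simp [h2, show ¬ (i < j + 1) by omega, show j ≤ i by omega, show ¬ (i - j = 0) by omega]

lemma pvUlAux (n m s' : Nat) : ∀ j,
    ∀ i, (((List.range j).foldl (pvStepL n (s'+1) m) 0)).testBit i = (decide (i < j) && pvGL n m s' i) := by
  intro j
  induction j with
  | zero => intro i; simp
  | succ j ih =>
    intro i
    rw [List.range_succ, List.foldl_append]
    exact pvStepL_testBit n m s' _ j ih i

lemma pvUlN_testBit (n m s' : Nat) (hn : n < 2^32) (hm : m < 2^32) :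
    ∀ i, (pvUlN n (s'+1) m).testBit i = pvGL n m s' i := by
  intro i
  rw [pvUlN, pvUlAux]
  by_cases h : i < 32
  · simp [h]
  · simp [h, pvGL_high n m s' hn hm i (by omega)]

lemma pvUlN_lt (n m s' : Nat) (hn : n < 2^32) (hm : m < 2^32) : pvUlN n (s'+1) m < 2^32 :=
  pvLtOfBits _ (fun i hi => by
    rw [pvUlN_testBit n m s' hn hm, pvGL_high n m s' hn hm i hi])

-- B-side Nat recurrences hit the same bit functions
lemma pvIRN_high (v s : Nat) (hv : v < 2^32) : ∀ t i, 32 ≤ i → (pvIRN v s t).testBit i = false := by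
  intro t
  induction t with
  | zero => intro i hi; exact pvHighBit hv hi
  | succ t ih =>
    intro i hi
    rw [pvIRN, Nat.testBit_xor, Nat.testBit_shiftRight, pvHighBit hv hi, ih (s+i) (by omega)]
    rfl

lemma pvIRN_testBit (n s' : Nat) (hn : n < 2^32) :
    ∀ t i, 32 ≤ i + (s'+1)*(t+1) → (pvIRN n (s'+1) t).testBit i = pvGR n s' i := by
  intro t
  induction t with
  | zero =>
    intro i hi
    by_cases h : i < 32
    · rw [pvIRN, pvGR, if_pos h, dif_neg (by omega)]
      simp
    · rw [pvIRN, pvGR, if_neg h, pvHighBit hn (by omega)]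
  | succ t ih =>
    intro i hi
    by_cases h32 : 32 ≤ i
    · rw [pvIRN_high n (s'+1) hn (t+1) i h32, pvGR_high n s' i h32]
    · rw [pvIRN, Nat.testBit_xor, Nat.testBit_shiftRight]
      conv_rhs => rw [pvGR]
      rw [if_pos (by omega)]
      by_cases hc : i + (s'+1) < 32
      · rw [dif_pos hc, ih ((s'+1) + i) (by ring_nf; ring_nf at hi; omega)]
        congr 1
        · congr 1
          omega
      · rw [dif_neg hc, pvIRN_high n (s'+1) hn t ((s'+1)+i) (by omega)]

lemma pvILN_high (v s m : Nat) (hv : v < 2^32) (hm : m < 2^32) :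
    ∀ t i, 32 ≤ i → (pvILN v s m t).testBit i = false := by
  intro t
  induction t with
  | zero => intro i hi; exact pvHighBit hv hi
  | succ t ih =>
    intro i hi
    rw [pvILN, Nat.testBit_xor, Nat.testBit_and, pvHighBit hv hi, pvHighBit hm hi]
    simp

lemma pvILN_testBit (n m s' : Nat) (hn : n < 2^32) (hm : m < 2^32) :
    ∀ t i, i < (s'+1)*(t+1) ∨ 32 ≤ i → (pvILN n (s'+1) m t).testBit i = pvGL n m s' i := by
  intro t
  induction t with
  | zero =>
    intro i hi
    rcases hi with hi | hi
    · rw [pvILN, pvGL, dif_neg (by omega)]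
      simp
    · rw [pvILN_high n (s'+1) m hn hm 0 i hi, pvGL_high n m s' hn hm i hi]
  | succ t ih =>
    intro i hi
    by_cases h32 : 32 ≤ i
    · rw [pvILN_high n (s'+1) m hn hm (t+1) i h32, pvGL_high n m s' hn hm i h32]
    · rw [pvILN, Nat.testBit_xor, Nat.testBit_and, Nat.testBit_shiftLeft]
      conv_rhs => rw [pvGL]
      by_cases hc : s'+1 ≤ i
      · rw [dif_pos hc]
        have hrec : (pvILN n (s'+1) m t).testBit (i - (s'+1)) = pvGL n m s' (i - (s'+1)) := by
          apply ih
          have hmul : (s'+1)*(t+1+1) = (s'+1)*(t+1) + (s'+1) := by ring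
          rcases hi with hi | hi
          · left; omega
          · omega
        rw [hrec]
        simp [hc, Bool.and_comm]
      · rw [dif_neg hc]
        simp [hc]

-- stage equalities on Nat (common value: the bit recurrences)
lemma pvStageR (n s' t : Nat) (hn : n < 2^32) (h : ∀ i, i < 32 → 32 ≤ i + (s'+1)*(t+1)) :
    pvUrN n (s'+1) = pvIRN n (s'+1) t := by
  apply Nat.eq_of_testBit_eq
  intro i
  rw [pvUrN_testBit]
  by_cases h32 : 32 ≤ i
  · rw [pvGR_high n s' i h32, pvIRN_high n (s'+1) hn t i h32]
  · rw [pvIRN_testBit n s' hn t i (h i (by omega))]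

lemma pvStageL (n m s' t : Nat) (hn : n < 2^32) (hm : m < 2^32)
    (h : ∀ i, i < 32 → i < (s'+1)*(t+1) ∨ 32 ≤ i) :
    pvUlN n (s'+1) m = pvILN n (s'+1) m t := by
  apply Nat.eq_of_testBit_eq
  intro i
  rw [pvUlN_testBit n m s' hn hm]
  by_cases h32 : 32 ≤ i
  · rw [pvGL_high n m s' hn hm i h32, pvILN_high n (s'+1) m hn hm t i h32]
  · rw [pvILN_testBit n m s' hn hm t i (h i (by omega))]

-- ---- Int ↔ Nat bridges ----

def pvLow (v : Int) : Nat := (v % 4294967296).toNat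

lemma pvLow_natCast (u : Nat) (h : u < 4294967296) : pvLow ((u : Nat) : Int) = u := by
  unfold pvLow
  omega

lemma pvLow_cast (v : Int) : ((pvLow v : Nat) : Int) = v % 4294967296 := by
  unfold pvLow
  omega

lemma pvLow_lt (v : Int) : pvLow v < 4294967296 := by
  unfold pvLow
  omega

-- key bit bridge: bit j of any Python int is bit j of its low 32-bit word (j < 32)
lemma pvBandBit (v : Int) (j : Nat) (hj : j < 32) :
    PySem.Int.band (v >>> j) 1 = ((((pvLow v) >>> j) &&& 1 : Nat) : Int) := by
  rw [PySem.Int.band_one, PySem.Int.mod_eq_emod_of_pos (by norm_num), Int.shiftRight_eq_div_pow]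
  rw [Nat.shiftRight_eq_div_pow, Nat.and_one_is_mod]
  have hcast : (((pvLow v) / 2^j % 2 : Nat) : Int) = ((pvLow v : Nat) : Int) / 2^j % 2 := by
    push_cast
    rfl
  rw [hcast, pvLow_cast]
  interval_cases j <;> omega

-- band with the 32-bit mask is emod 2^32 (both signs)
lemma pvBandMask (v : Int) : PySem.Int.band v 4294967295 = v % 4294967296 := by
  by_cases hv : 0 ≤ v
  · rw [PySem.Int.band_of_nonneg hv (by norm_num)]
    have h1 : ((4294967295 : Int)).toNat = 4294967295 := rfl
    rw [h1]
    set w := v.toNat with hw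
    have h2 : w &&& 4294967295 = w % 4294967296 := by
      have := Nat.and_two_pow_sub_one_eq_mod w 32
      norm_num at this
      exact this
    rw [h2]
    omega
  · rw [PySem.Int.band]
    rw [if_neg hv, if_pos (by norm_num)]
    have h1 : ((4294967295 : Int)).toNat = 4294967295 := rfl
    rw [h1]
    set w := (-v - 1).toNat with hw
    have h2 : 4294967295 &&& w = w % 4294967296 := by
      have := Nat.and_two_pow_sub_one_eq_mod w 32
      norm_num at this
      rw [Nat.and_comm]
      exact this
    rw [h2]
    omega

-- cast-commute a fold over a Nat-index list
lemma pvFoldCast (fI : Int → Int → Int) (fN : Nat → Nat → Nat) :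
    ∀ (l : List Nat) (o : Nat), (∀ (o' : Nat), ∀ j ∈ l, fI ((o' : Nat) : Int) ((j : Nat) : Int) = ((fN o' j : Nat) : Int)) →
    List.foldl fI ((o : Nat) : Int) (l.map (fun j => ((j : Nat) : Int))) = ((List.foldl fN o l : Nat) : Int) := by
  intro l
  induction l with
  | nil => intro o _; rfl
  | cons j l ih =>
    intro o h
    simp only [List.map_cons, List.foldl_cons]
    rw [h o j (by simp)]
    exact ih (fN o j) (fun o' j' hj' => h o' j' (by simp [hj']))

lemma pvDecList_mem : ∀ j i, i ∈ pvDecList j → i < j := by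
  intro j
  induction j with
  | zero => intro i h; cases h
  | succ j ih =>
    intro i h
    rcases h with _ | h
    · omega
    · have := ih _ ‹i ∈ pvDecList j›
      omega

lemma pvBandCast1 (x : Nat) : PySem.Int.band ((x : Nat) : Int) 1 = ((x &&& 1 : Nat) : Int) := by
  exact_mod_cast PySem.Int.band_natCast x 1

-- A-side bridges
lemma pvUrA_eq (v : Int) (s : Nat) : pvUrA v ((s : Nat) : Int) = ((pvUrN (pvLow v) s : Nat) : Int) := by
  unfold pvUrA pvUrN
  rw [show PySem.List.pyRange 31 (-1) (-1) = (pvDecList 32).map (fun j => ((j:Nat):Int)) from by decide]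
  apply pvFoldCast
  intro o' j hj
  have hjlt : j < 32 := pvDecList_mem 32 j hj
  have hcond : ((j:Int) + (s:Int) < 32) ↔ (j + s < 32) := by exact_mod_cast Iff.rfl
  have ht : ((j:Int) + (s:Int)).toNat = j + s := by omega
  have htj : ((j:Int)).toNat = j := by omega
  unfold pvStepR
  simp only [htj, ht, Int.shiftRight_natCast_right]
  rw [pvBandBit v j hjlt]
  by_cases hc : j + s < 32
  · rw [if_pos (hcond.mpr hc), if_pos hc,
      show ((o':Nat):Int) >>> (j+s) = ((o' >>> (j+s) : Nat) : Int) from by simp,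
      pvBandCast1]
    simp
    norm_cast
  · rw [if_neg (fun h => hc (hcond.mp h)), if_neg hc]
    simp
    norm_cast

lemma pvUlA_eq (v : Int) (s m : Nat) : pvUlA v ((s : Nat) : Int) ((m : Nat) : Int) = ((pvUlN (pvLow v) s m : Nat) : Int) := by
  unfold pvUlA pvUlN
  rw [show PySem.List.pyRange 0 32 1 = (List.range 32).map (fun j => ((j:Nat):Int)) from by decide]
  apply pvFoldCast
  intro o' j hj
  have hjlt : j < 32 := List.mem_range.mp hj
  have hcond : (0 ≤ (j:Int) - (s:Int)) ↔ (s ≤ j) := by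
    constructor <;> intro h <;> omega
  have ht : ((j:Int) - (s:Int)).toNat = j - s := by omega
  have htj : ((j:Int)).toNat = j := by omega
  unfold pvStepL
  simp only [htj, ht, Int.shiftRight_natCast_right]
  rw [pvBandBit v j hjlt,
      show ((m:Nat):Int) >>> j = ((m >>> j : Nat) : Int) from by simp,
      pvBandCast1]
  by_cases hc : s ≤ j
  · rw [if_pos (hcond.mpr hc), if_pos hc,
      show ((o':Nat):Int) >>> (j-s) = ((o' >>> (j-s) : Nat) : Int) from by simp,
      pvBandCast1]
    simp
    norm_cast
  · rw [if_neg (fun h => hc (hcond.mp h)), if_neg hc,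
      show PySem.Int.band 0 ((m >>> j &&& 1 : Nat) : Int) = 0 from by
        rw [PySem.Int.band_comm]; exact PySem.Int.band_zero _]
    simp
    norm_cast

-- B-side bridges
lemma pvIR_eq (x s t : Nat) : pvInvRight ((x : Nat) : Int) ((s : Nat) : Int) ((t : Nat) : Int) = ((pvIRN x s t : Nat) : Int) := by
  unfold pvInvRight
  rw [PySem.List.pyRange_zero_natCast]
  induction t with
  | zero => rfl
  | succ t ih =>
    rw [List.range_succ, List.map_append, List.foldl_append, ih]
    simp only [List.map_cons, List.map_nil, List.foldl_cons, List.foldl_nil]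
    rw [show ((s:Int)).toNat = s from by omega,
        show ((pvIRN x s t : Nat) : Int) >>> s = ((pvIRN x s t >>> s : Nat) : Int) from by simp,
        PySem.Int.bxor_natCast]
    rfl

lemma pvIL_eq (x s m t : Nat) : pvInvLeft ((x : Nat) : Int) ((s : Nat) : Int) ((m : Nat) : Int) ((t : Nat) : Int) = ((pvILN x s m t : Nat) : Int) := by
  unfold pvInvLeft
  rw [PySem.List.pyRange_zero_natCast]
  induction t with
  | zero => rfl
  | succ t ih =>
    rw [List.range_succ, List.map_append, List.foldl_append, ih]
    simp only [List.map_cons, List.map_nil, List.foldl_cons, List.foldl_nil]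
    rw [show ((s:Int)).toNat = s from by omega,
        show ((pvILN x s m t : Nat) : Int) <<< s = ((pvILN x s m t <<< s : Nat) : Int) from by simp,
        PySem.Int.band_natCast, PySem.Int.bxor_natCast]
    rfl

-- the heart: bit-by-bit untemper = word-level untemper, for every Python int
lemma pvUntemper_eq (y : Int) : pvUntemperA y = pvUntemperB y := by
  have hP32 : (2:Nat)^32 = 4294967296 := by norm_num
  -- low words of the four A-side stages
  set n0 := pvLow y with hn0
  have hn0lt : n0 < 2^32 := by rw [hP32]; exact pvLow_lt y
  set u1 := pvUrN n0 18 with hu1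
  have hu1lt : u1 < 2^32 := pvUrN_lt n0 17
  set u2 := pvUlN u1 15 0xEFC60000 with hu2
  have hu2lt : u2 < 2^32 := pvUlN_lt u1 0xEFC60000 14 hu1lt (by norm_num)
  set u3 := pvUlN u2 7 0x9D2C5680 with hu3
  have hu3lt : u3 < 2^32 := pvUlN_lt u2 0x9D2C5680 6 hu2lt (by norm_num)
  -- A side
  have hA1 : pvUrA y 18 = ((u1 : Nat) : Int) := by
    have := pvUrA_eq y 18
    exact_mod_cast this
  have hA2 : pvUlA ((u1 : Nat) : Int) 15 0xEFC60000 = ((u2 : Nat) : Int) := by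
    have := pvUlA_eq ((u1 : Nat) : Int) 15 0xEFC60000
    rw [pvLow_natCast u1 (by omega)] at this
    exact_mod_cast this
  have hA3 : pvUlA ((u2 : Nat) : Int) 7 0x9D2C5680 = ((u3 : Nat) : Int) := by
    have := pvUlA_eq ((u2 : Nat) : Int) 7 0x9D2C5680
    rw [pvLow_natCast u2 (by omega)] at this
    exact_mod_cast this
  have hA4 : pvUrA ((u3 : Nat) : Int) 11 = ((pvUrN u3 11 : Nat) : Int) := by
    have := pvUrA_eq ((u3 : Nat) : Int) 11
    rw [pvLow_natCast u3 (by omega)] at this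
    exact_mod_cast this
  -- B side
  have hB0 : PySem.Int.band y 0xFFFFFFFF = ((n0 : Nat) : Int) := by
    rw [pvBandMask y, hn0, pvLow_cast]
  have hB1 : pvInvRight ((n0 : Nat) : Int) 18 1 = ((pvIRN n0 18 1 : Nat) : Int) := by
    exact_mod_cast pvIR_eq n0 18 1
  have hB2 : pvInvLeft ((u1 : Nat) : Int) 15 0xEFC60000 2
      = ((pvILN u1 15 0xEFC60000 2 : Nat) : Int) := by
    exact_mod_cast pvIL_eq u1 15 0xEFC60000 2
  have hB3 : pvInvLeft ((u2 : Nat) : Int) 7 0x9D2C5680 4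
      = ((pvILN u2 7 0x9D2C5680 4 : Nat) : Int) := by
    exact_mod_cast pvIL_eq u2 7 0x9D2C5680 4
  have hB4 : pvInvRight ((u3 : Nat) : Int) 11 2
      = ((pvIRN u3 11 2 : Nat) : Int) := by
    exact_mod_cast pvIR_eq u3 11 2
  -- stage equalities
  have hS1 : u1 = pvIRN n0 18 1 := pvStageR n0 17 1 hn0lt (by intro i h; omega)
  have hS2 : u2 = pvILN u1 15 0xEFC60000 2 := pvStageL u1 0xEFC60000 14 2 hu1lt (by norm_num) (by intro i h; omega)
  have hS3 : u3 = pvILN u2 7 0x9D2C5680 4 := pvStageL u2 0x9D2C5680 6 4 hu2lt (by norm_num) (by intro i h; omega)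
  have hS4 : pvUrN u3 11 = pvIRN u3 11 2 := pvStageR u3 10 2 hu3lt (by intro i h; omega)
  show pvUrA (pvUlA (pvUlA (pvUrA y 18) 15 0xEFC60000) 7 0x9D2C5680) 11
      = pvInvRight (pvInvLeft (pvInvLeft (pvInvRight (PySem.Int.band y 0xFFFFFFFF) 18 1) 15 0xEFC60000 2) 7 0x9D2C5680 4) 11 2
  rw [hA1, hA2, hA3, hA4, hB0, hB1, ← hS1, hB2, ← hS2, hB3, ← hS3, hB4, hS4]




-- ===== VERDICT (by name: the statement is the Claim_ definition above) =====
theorem state_from_assignment_spec : Claim_equal_state_from_assignment := by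
  intro fc inv asg _dom _pre
  unfold Spec_state_from_assignment
  unfold state_from_assignment state_from_assignment_alt
  simp only []
  rw [PySem.List.foldl_append_singleton_eq_map (fun p => pvUntemperA (pvFullA (pvIndexOf inv) asg p))]
  rw [List.nil_append]
  apply List.map_congr_left
  intro p _
  rw [pvUntemper_eq]
  rfl
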